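-- pv_equiv track=rewrite | github.com/jcloix/ai-balatro | scripts/python/find_missing_cards.py | find_missing_for_value
-- ===== SOURCE A (Python) =====
-- from collections import defaultdict
--
-- def find_missing_for_value(data, attribute, target_value):
--     """Return all names that do NOT have the specified attribute value."""
--     name_to_attrs = defaultdict(set)
--
--     for _, info in data.items():
--         name = info.get("name")
--         value = info.get(attribute)
--         if name and value:
--             name_to_attrs[name].add(value)
--
--     missing_names = [name for name, values in name_to_attrs.items() if target_value not in values]
--     return sorted(missing_names)
-- ===== SOURCE B (Python) =====
-- def find_missing_for_value(data, attribute, target_value):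
--     """Return all names that do NOT have the specified attribute value."""
--     names = []
--     hits = []
--     for info in data.values():
--         n = info.get("name")
--         v = info.get(attribute)
--         if n and v:
--             names.append(n)
--             if v == target_value:
--                 hits.append(n)
--     names.sort()
--     hits.sort()
--     out = []
--     j = 0
--     for n in names:
--         while j < len(hits) and hits[j] < n:
--             j += 1
--         if (j == len(hits) or hits[j] != n) and (not out or out[-1] != n):
--             out.append(n)
--     return out
-- ===== Notes on version B (the rewrite author's own statement) =====
-- stated objective: alternative
-- what changed: Replaces A's dict-of-value-sets grouping plus a membership-filter comprehension by collecting two flat lists (truthy names, and names seen with the target value), sorting both, and computing the deduplicated difference with a two-pointer merge scan over the sorted lists — no dict or set is built at all.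
import Mathlib
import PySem

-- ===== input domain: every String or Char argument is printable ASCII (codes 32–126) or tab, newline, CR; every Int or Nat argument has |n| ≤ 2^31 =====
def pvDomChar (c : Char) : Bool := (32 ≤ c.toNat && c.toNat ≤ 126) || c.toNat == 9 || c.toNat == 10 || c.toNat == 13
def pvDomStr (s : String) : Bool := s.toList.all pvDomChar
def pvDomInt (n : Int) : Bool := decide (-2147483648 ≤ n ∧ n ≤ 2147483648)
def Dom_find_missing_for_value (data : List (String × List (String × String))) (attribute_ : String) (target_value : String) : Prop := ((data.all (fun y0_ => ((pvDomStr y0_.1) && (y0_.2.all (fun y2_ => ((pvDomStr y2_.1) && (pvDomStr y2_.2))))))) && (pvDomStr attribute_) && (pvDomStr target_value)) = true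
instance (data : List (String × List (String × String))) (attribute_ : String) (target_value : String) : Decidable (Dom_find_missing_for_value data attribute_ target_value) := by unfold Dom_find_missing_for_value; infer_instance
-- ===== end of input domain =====

-- B replaces A's dict-of-value-sets grouping + membership-filter comprehension by two flat lists
-- sorted and combined with a two-pointer merge difference (objective: alternative).


-- ===== PORT A =====
-- A's loop body: if name and info.get(attribute) are truthy, add the value to name's set.
def pvStepA (attribute_ : String) (d : PySem.Dict String (PySem.Set String))
    (kv : String × List (String × String)) : PySem.Dict String (PySem.Set String) :=
  let info : PySem.Dict String String := PySem.Dict.mk kv.2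
  match info.get? "name", info.get? attribute_ with
  | some name, some value =>
      if name ≠ "" ∧ value ≠ "" then
        d.modify name PySem.Set.empty (fun s => PySem.Set.add s value)
      else d
  | _, _ => d

-- literal transliteration of A: group truthy attribute values into a dict name -> set of values,
-- then list-comprehension filter on the items, then sorted.
def find_missing_for_value (data : List (String × List (String × String))) (attribute_ : String) (target_value : String) : List String :=
  let name_to_attrs := data.foldl (pvStepA attribute_) PySem.Dict.empty
  let missing_names :=
    (name_to_attrs.items.filter (fun p => !(PySem.Set.contains p.2 target_value))).map (fun p => p.1)
  PySem.List.sorted missing_names (fun x => x) false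

-- ===== PORT B =====
-- B's collection loop: same truthiness guard; append the name to `names`, and to `hits` when the
-- value equals the target.
def pvStepB (attribute_ target_value : String) (st : List String × List String)
    (kv : String × List (String × String)) : List String × List String :=
  let info : PySem.Dict String String := PySem.Dict.mk kv.2
  match info.get? "name", info.get? attribute_ with
  | some name, some value =>
      if name ≠ "" ∧ value ≠ "" then
        (st.1 ++ [name], if value = target_value then st.2 ++ [name] else st.2)
      else st
  | _, _ => st

-- B's merge loop: walk the sorted names; `hits.dropWhile (· < n)` is the pointer j advanced past
-- smaller hits; append n unless it is the current hit or a duplicate of the last output.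
def pvMergeLoop : List String → List String → List String → List String
  | [], _, out => out
  | n :: ns, hits, out =>
      let hits' := hits.dropWhile (fun h => decide (h < n))
      let out' := if hits'.head? ≠ some n ∧ out.getLast? ≠ some n then out ++ [n] else out
      pvMergeLoop ns hits' out'

-- literal transliteration of B: collect the two lists, sort both, two-pointer merge difference.
def find_missing_for_value_alt (data : List (String × List (String × String))) (attribute_ : String) (target_value : String) : List String :=
  let st := data.foldl (pvStepB attribute_ target_value) ([], [])
  let names := PySem.List.sorted st.1 (fun x => x) false
  let hits := PySem.List.sorted st.2 (fun x => x) false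
  pvMergeLoop names hits []

-- ===== PRECONDITION & SPEC =====
def Spec_find_missing_for_value (data : List (String × List (String × String))) (attribute_ : String) (target_value : String) (out : List String) : Prop := out = find_missing_for_value_alt data attribute_ target_value
instance (data : List (String × List (String × String))) (attribute_ : String) (target_value : String) (out : List String) : Decidable (Spec_find_missing_for_value data attribute_ target_value out) := by unfold Spec_find_missing_for_value; infer_instance

-- ===== CLAIM (what is proved, stated in full; the proofs are below) =====
def Claim_equal_find_missing_for_value : Prop := ∀ (data : List (String × List (String × String))) (attribute_ : String) (target_value : String), Dom_find_missing_for_value data attribute_ target_value → Spec_find_missing_for_value data attribute_ target_value (find_missing_for_value data attribute_ target_value)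

-- ===== LEMMAS AND PROOFS =====

-- the fold invariant relating A's dict to B's pair of lists
def pvInv (target_value : String) (d : PySem.Dict String (PySem.Set String))
    (st : List String × List String) : Prop :=
  (∀ n : String, n ∈ d.keys ↔ n ∈ st.1) ∧ d.keys.Nodup ∧
  (∀ n : String, target_value ∈ d.getD n PySem.Set.empty ↔ n ∈ st.2)

theorem pvInv_step (attribute_ target_value : String)
    (d : PySem.Dict String (PySem.Set String)) (st : List String × List String)
    (kv : String × List (String × String)) (h : pvInv target_value d st) :
    pvInv target_value (pvStepA attribute_ d kv) (pvStepB attribute_ target_value st kv) := by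
  obtain ⟨hk, hnd, hmem⟩ := h
  unfold pvStepA pvStepB
  cases hn : (PySem.Dict.mk kv.2 : PySem.Dict String String).get? "name" with
  | none => simpa [hn] using ⟨hk, hnd, hmem⟩
  | some name =>
    cases hv : (PySem.Dict.mk kv.2 : PySem.Dict String String).get? attribute_ with
    | none => simpa [hn, hv] using ⟨hk, hnd, hmem⟩
    | some value =>
      simp only [hn, hv]
      by_cases ht : name ≠ "" ∧ value ≠ ""
      · simp only [if_pos ht]
        refine ⟨?_, ?_, ?_⟩
        · intro n
          rw [PySem.Dict.keys_modify]
          by_cases hc : d.contains name = true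
          · rw [PySem.Dict.keys_insert_of_contains _ _ hc]
            have hnm : name ∈ st.1 :=
              (hk name).mp ((PySem.Dict.contains_iff_mem_keys d name).mp hc)
            simp only [List.mem_append, List.mem_singleton, hk n]
            constructor
            · exact Or.inl
            · rintro (h1 | h1)
              · exact h1
              · exact h1 ▸ hnm
          · rw [PySem.Dict.keys_insert_of_not_contains _ _ (by simpa using hc)]
            simp [hk n]
        · rw [PySem.Dict.keys_modify]
          by_cases hc : d.contains name = true
          · rw [PySem.Dict.keys_insert_of_contains _ _ hc]; exact hnd
          · rw [PySem.Dict.keys_insert_of_not_contains _ _ (by simpa using hc)]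
            refine List.Nodup.append hnd (List.nodup_singleton name) ?_
            intro a ha hb
            rw [List.mem_singleton] at hb; subst hb
            exact hc ((PySem.Dict.contains_iff_mem_keys d a).mpr ha)
        · intro n
          rw [PySem.Dict.getD_modify]
          by_cases hne : n = name
          · subst hne
            rw [if_pos rfl, PySem.Set.mem_add]
            by_cases hvt : value = target_value
            · simp [hvt]
            · rw [if_neg hvt]
              constructor
              · rintro (h1 | h1)
                · exact (hmem n).mp h1
                · exact absurd h1.symm hvt
              · intro h1; exact Or.inl ((hmem n).mpr h1)
          · rw [if_neg hne]
            by_cases hvt : value = target_value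
            · rw [if_pos hvt]
              simp only [List.mem_append, List.mem_singleton]
              constructor
              · intro h1; exact Or.inl ((hmem n).mp h1)
              · rintro (h1 | h1)
                · exact (hmem n).mpr h1
                · exact absurd h1 hne
            · rw [if_neg hvt]; exact hmem n
      · simpa [if_neg ht] using ⟨hk, hnd, hmem⟩

theorem pvInv_foldl (attribute_ target_value : String)
    (data : List (String × List (String × String)))
    (d : PySem.Dict String (PySem.Set String)) (st : List String × List String)
    (h : pvInv target_value d st) :
    pvInv target_value (data.foldl (pvStepA attribute_) d)
      (data.foldl (pvStepB attribute_ target_value) st) := by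
  induction data generalizing d st with
  | nil => exact h
  | cons kv rest ih => exact ih _ _ (pvInv_step attribute_ target_value d st kv h)

-- membership in a sorted hits list survives the dropWhile pointer advance for z ≥ n
theorem pvMem_dropWhile (hits : List String) (n z : String)
    (hh : hits.Pairwise (· ≤ ·)) (hz : n ≤ z) :
    z ∈ hits.dropWhile (fun h => decide (h < n)) ↔ z ∈ hits := by
  induction hits with
  | nil => simp
  | cons h t ih =>
    rcases List.pairwise_cons.mp hh with ⟨_, ht⟩
    by_cases hlt : h < n
    · rw [List.dropWhile_cons_of_pos (by simpa using hlt)]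
      rw [ih ht, List.mem_cons]
      constructor
      · exact Or.inr
      · rintro (h1 | h1)
        · exact absurd (h1 ▸ hz) (not_le.mpr hlt)
        · exact h1
    · rw [List.dropWhile_cons_of_neg (by simpa using hlt)]

-- in a sorted hits list, n is the current head after the advance iff n occurs at all
theorem pvHead_dropWhile (hits : List String) (n : String) (hh : hits.Pairwise (· ≤ ·)) :
    (hits.dropWhile (fun h => decide (h < n))).head? = some n ↔ n ∈ hits := by
  induction hits with
  | nil => simp
  | cons h t ih =>
    rcases List.pairwise_cons.mp hh with ⟨hle, ht⟩
    by_cases hlt : h < n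
    · rw [List.dropWhile_cons_of_pos (by simpa using hlt)]
      rw [ih ht, List.mem_cons]
      constructor
      · exact Or.inr
      · rintro (h1 | h1)
        · exact absurd (h1 ▸ hlt) (lt_irrefl n)
        · exact h1
    · rw [List.dropWhile_cons_of_neg (by simpa using hlt)]
      rw [not_lt] at hlt
      simp only [List.head?_cons, Option.some.injEq, List.mem_cons]
      constructor
      · intro h1; exact Or.inl h1.symm
      · rintro (h1 | h1)
        · exact h1.symm
        · exact le_antisymm (hle n h1) hlt

-- in a strictly increasing out bounded above by n, n occurs iff it is the last element
theorem pvMem_iff_getLast (out : List String) (n : String)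
    (ho : out.Pairwise (· < ·)) (hb : ∀ x ∈ out, x ≤ n) :
    n ∈ out ↔ out.getLast? = some n := by
  induction out with
  | nil => simp
  | cons x t ih =>
    rcases List.pairwise_cons.mp ho with ⟨hx, ht⟩
    cases t with
    | nil => simp [eq_comm]
    | cons y s =>
      rw [List.getLast?_cons_cons, List.mem_cons]
      have hyn : ¬ n = x := by
        intro h1
        have h2 : x < y := hx y (List.mem_cons_self)
        have h3 : y ≤ n := hb y (List.mem_cons_of_mem _ (List.mem_cons_self))
        exact absurd (lt_of_lt_of_le h2 (h3.trans (le_of_eq h1))) (lt_irrefl x)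
      rw [ih ht (fun z hz => hb z (List.mem_cons_of_mem _ hz))]
      simp [hyn]

-- the merge loop, characterised: strictly increasing output whose members are out's plus the
-- names not among the hits
theorem pvMergeLoop_spec (names : List String) : ∀ (hits out : List String),
    names.Pairwise (· ≤ ·) → hits.Pairwise (· ≤ ·) → out.Pairwise (· < ·) →
    (∀ x ∈ out, ∀ y ∈ names, x ≤ y) →
    (pvMergeLoop names hits out).Pairwise (· < ·) ∧
    (∀ z, z ∈ pvMergeLoop names hits out ↔ z ∈ out ∨ (z ∈ names ∧ z ∉ hits)) := by
  induction names with
  | nil => intro hits out _ _ ho _; exact ⟨ho, by simp [pvMergeLoop]⟩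
  | cons n ns ih =>
    intro hits out hn hh ho hb
    rcases List.pairwise_cons.mp hn with ⟨hn1, hn2⟩
    have hb_n : ∀ x ∈ out, x ≤ n := fun x hx => hb x hx n List.mem_cons_self
    have hh' : (hits.dropWhile (fun h => decide (h < n))).Pairwise (· ≤ ·) :=
      hh.sublist (List.dropWhile_sublist _)
    have hmemdw : ∀ z, n ≤ z →
        (z ∈ hits.dropWhile (fun h => decide (h < n)) ↔ z ∈ hits) :=
      fun z hz => pvMem_dropWhile hits n z hh hz
    have hhead : (hits.dropWhile (fun h => decide (h < n))).head? = some n ↔ n ∈ hits :=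
      pvHead_dropWhile hits n hh
    by_cases hg : (hits.dropWhile (fun h => decide (h < n))).head? ≠ some n ∧
        out.getLast? ≠ some n
    · have hstep : pvMergeLoop (n :: ns) hits out =
          pvMergeLoop ns (hits.dropWhile (fun h => decide (h < n))) (out ++ [n]) := by
        simp only [pvMergeLoop]
        rw [if_pos hg]
      have hlt : ∀ x ∈ out, x < n := by
        intro x hx
        rcases lt_or_eq_of_le (hb_n x hx) with h1 | h1
        · exact h1
        · exact absurd ((pvMem_iff_getLast out n ho hb_n).mp (h1 ▸ hx)) hg.2
      have ho' : (out ++ [n]).Pairwise (· < ·) := by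
        rw [List.pairwise_append]
        exact ⟨ho, List.pairwise_singleton _ _, fun x hx y hy => by
          rw [List.mem_singleton] at hy; exact hy ▸ hlt x hx⟩
      have hb' : ∀ x ∈ out ++ [n], ∀ y ∈ ns, x ≤ y := by
        intro x hx y hy
        rcases List.mem_append.mp hx with h1 | h1
        · exact hb x h1 y (List.mem_cons_of_mem _ hy)
        · rw [List.mem_singleton] at h1; exact h1 ▸ hn1 y hy
      obtain ⟨hp, hm⟩ := ih (hits.dropWhile (fun h => decide (h < n))) (out ++ [n])
        hn2 hh' ho' hb'
      rw [hstep]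
      refine ⟨hp, fun z => ?_⟩
      rw [hm z]
      have hnhits : n ∉ hits := fun h1 => hg.1 (hhead.mpr h1)
      simp only [List.mem_append, List.mem_cons, List.not_mem_nil, or_false]
      constructor
      · rintro ((h1 | h1) | ⟨h1, h2⟩)
        · exact Or.inl h1
        · exact Or.inr ⟨Or.inl h1, h1 ▸ hnhits⟩
        · exact Or.inr ⟨Or.inr h1, fun h3 => h2 ((hmemdw z (hn1 z h1)).mpr h3)⟩
      · rintro (h1 | ⟨h1 | h1, h2⟩)
        · exact Or.inl (Or.inl h1)
        · exact Or.inl (Or.inr h1)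
        · exact Or.inr ⟨h1, fun h3 => h2 ((hmemdw z (hn1 z h1)).mp h3)⟩
    · have hstep : pvMergeLoop (n :: ns) hits out =
          pvMergeLoop ns (hits.dropWhile (fun h => decide (h < n))) out := by
        simp only [pvMergeLoop]
        rw [if_neg hg]
      have hb' : ∀ x ∈ out, ∀ y ∈ ns, x ≤ y :=
        fun x hx y hy => hb x hx y (List.mem_cons_of_mem _ hy)
      obtain ⟨hp, hm⟩ := ih (hits.dropWhile (fun h => decide (h < n))) out hn2 hh' ho hb'
      rw [hstep]
      refine ⟨hp, fun z => ?_⟩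
      rw [hm z]
      rw [not_and_or, not_not, not_not] at hg
      simp only [List.mem_cons]
      constructor
      · rintro (h1 | ⟨h1, h2⟩)
        · exact Or.inl h1
        · exact Or.inr ⟨Or.inr h1, fun h3 => h2 ((hmemdw z (hn1 z h1)).mpr h3)⟩
      · rintro (h1 | ⟨h1 | h1, h2⟩)
        · exact Or.inl h1
        · -- z = n: it is either the current hit or already the last output element
          subst h1
          rcases hg with h3 | h3
          · exact absurd (hhead.mp h3) h2
          · exact Or.inl (List.mem_of_getLast? h3)
        · exact Or.inr ⟨h1, fun h3 => h2 ((hmemdw z (hn1 z h1)).mp h3)⟩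

-- A's pre-sort list, characterised by the invariant
theorem pvMissing_char (target_value : String) (d : PySem.Dict String (PySem.Set String))
    (st : List String × List String) (h : pvInv target_value d st) :
    ((d.items.filter (fun p => !(PySem.Set.contains p.2 target_value))).map (fun p => p.1)).Nodup ∧
    (∀ z, z ∈ (d.items.filter (fun p => !(PySem.Set.contains p.2 target_value))).map (fun p => p.1)
      ↔ z ∈ st.1 ∧ z ∉ st.2) := by
  obtain ⟨hk, hnd, hmem⟩ := h
  rw [PySem.Dict.items_eq_map_keys d hnd PySem.Set.empty, List.filter_map, List.map_map]
  simp only [Function.comp_def, List.map_id']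
  constructor
  · exact (hnd.filter _)
  · intro z
    rw [List.mem_filter]
    constructor
    · rintro ⟨h1, h2⟩
      rw [Bool.not_eq_eq_eq_not, Bool.not_true] at h2
      refine ⟨(hk z).mp h1, fun h3 => ?_⟩
      have h4 : PySem.Set.contains (d.getD z PySem.Set.empty) target_value = true :=
        (PySem.Set.contains_iff _ _).mpr ((hmem z).mpr h3)
      rw [h2] at h4
      exact Bool.false_ne_true h4
    · rintro ⟨h1, h2⟩
      refine ⟨(hk z).mpr h1, ?_⟩
      rw [Bool.not_eq_eq_eq_not, Bool.not_true, ← Bool.not_eq_true]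
      intro h4
      exact h2 ((hmem z).mp ((PySem.Set.contains_iff _ _).mp h4))

-- ===== VERDICT (by name: the statement is the Claim_ definition above) =====
theorem find_missing_for_value_spec : Claim_equal_find_missing_for_value := by
  intro data attribute_ target_value _
  unfold Spec_find_missing_for_value find_missing_for_value find_missing_for_value_alt
  have hinv := pvInv_foldl attribute_ target_value data PySem.Dict.empty ([], [])
    ⟨by simp [PySem.Dict.keys_empty], by simp [PySem.Dict.keys_empty], by
      intro n; simp [PySem.Dict.getD, PySem.Dict.empty, PySem.Dict.get?, PySem.Set.empty]⟩
  obtain ⟨hndM, hmemM⟩ := pvMissing_char target_value _ _ hinv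
  set st := data.foldl (pvStepB attribute_ target_value) ([], []) with hst
  set M := (((data.foldl (pvStepA attribute_) PySem.Dict.empty).items.filter
      (fun p => !(PySem.Set.contains p.2 target_value))).map (fun p => p.1)) with hM
  have hnames : (PySem.List.sorted st.1 (fun x => x) false).Pairwise (· ≤ ·) :=
    PySem.List.sorted_pairwise st.1 (fun x => x)
  have hhits : (PySem.List.sorted st.2 (fun x => x) false).Pairwise (· ≤ ·) :=
    PySem.List.sorted_pairwise st.2 (fun x => x)
  obtain ⟨hp, hm⟩ := pvMergeLoop_spec (PySem.List.sorted st.1 (fun x => x) false)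
    (PySem.List.sorted st.2 (fun x => x) false) [] hnames hhits (List.Pairwise.nil)
    (by intro x hx; simp at hx)
  -- both sides are strictly increasing rearrangements of the same set of names
  have hperm : (pvMergeLoop (PySem.List.sorted st.1 (fun x => x) false)
      (PySem.List.sorted st.2 (fun x => x) false) []).Perm M := by
    rw [List.perm_ext_iff_of_nodup (hp.imp ne_of_lt) hndM]
    intro z
    rw [hm z, hmemM z]
    simp [PySem.List.mem_sorted]
  exact PySem.List.sorted_eq_of_perm_of_pairwise_lt _ _ (fun x => x) hperm hp
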